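-- pv_equiv track=rewrite | github.com/Wacchi-Lorie/voidminer-probability-chart | dim_weight_process.py | dim_to_ore_by_small
-- ===== SOURCE A (Python) =====
-- def dim_to_ore_by_small(dim_small, small_ore):
--     data_fin = {}
--     for dim, smalls in dim_small.items():
--         data_ore = {}
--         for small in smalls:
--             curr_small = small_ore[small]
--             ore, weight = next(iter(curr_small.items()))
--             if ore in data_ore:
--                 data_ore[ore] += weight
--             else:
--                 data_ore[ore] = weight
--         data_fin[dim] = {k: data_ore[k] for k in sorted(data_ore)}
--     return data_fin
-- ===== SOURCE B (Python) =====
-- def dim_to_ore_by_small(dim_small, small_ore):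
--     def agg(smalls):
--         pairs = sorted((next(iter(small_ore[s].items())) for s in smalls),
--                        key=lambda p: p[0])
--         out = {}
--         i = 0
--         n = len(pairs)
--         while i < n:
--             ore = pairs[i][0]
--             total = pairs[i][1]
--             i += 1
--             while i < n and pairs[i][0] == ore:
--                 total += pairs[i][1]
--                 i += 1
--             out[ore] = total
--         return out
--     return dict((dim, agg(smalls)) for dim, smalls in dim_small.items())
-- ===== Notes on version B (the rewrite author's own statement) =====
-- stated objective: alternative
-- what changed: Replaces the dict-accumulate-then-sort-keys strategy by a sort-then-group pass: the per-small (ore, weight) pairs are stably sorted by ore alone and consecutive equal-ore runs are summed in one linear scan, emitting the result directly in sorted-ore order.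
import Mathlib
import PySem

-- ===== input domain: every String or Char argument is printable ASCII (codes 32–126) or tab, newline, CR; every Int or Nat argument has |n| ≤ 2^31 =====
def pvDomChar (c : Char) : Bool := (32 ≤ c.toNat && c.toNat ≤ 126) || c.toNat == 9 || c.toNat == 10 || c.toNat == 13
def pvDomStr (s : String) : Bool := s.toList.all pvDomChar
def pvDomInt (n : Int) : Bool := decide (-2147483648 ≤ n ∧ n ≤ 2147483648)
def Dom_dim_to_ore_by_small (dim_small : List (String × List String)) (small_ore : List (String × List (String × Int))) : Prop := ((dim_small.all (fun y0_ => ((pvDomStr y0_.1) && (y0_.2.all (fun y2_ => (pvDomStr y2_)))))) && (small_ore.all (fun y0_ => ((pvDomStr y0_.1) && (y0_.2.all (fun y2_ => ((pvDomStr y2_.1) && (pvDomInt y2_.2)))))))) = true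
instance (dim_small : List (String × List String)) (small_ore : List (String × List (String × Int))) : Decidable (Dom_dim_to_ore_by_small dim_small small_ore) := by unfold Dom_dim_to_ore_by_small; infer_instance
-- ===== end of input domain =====

-- B replaces A's per-dimension dict accumulation followed by a sorted-key rebuild with a
-- sort-then-group pass: stably sort the (ore, weight) pairs by ore, then sum consecutive
-- equal-ore runs in one scan (objective: alternative decomposition, same cost class).

-- ===== PORT A =====
-- A's inner loop body: look the small up (value present and nonempty under Pre_; the defaults only
-- make the function total), then accumulate its first (ore, weight) item into data_ore.
def dimA_step (small_ore : List (String × List (String × Int))) (d : PySem.Dict String Int) (small : String) : PySem.Dict String Int :=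
  let curr_small := PySem.Dict.getD (PySem.Dict.mk small_ore) small []
  let ow := curr_small.headD ("", 0)
  if d.contains ow.1 then d.modify ow.1 0 (fun v => v + ow.2) else d.insert ow.1 ow.2

-- A's body for one dimension: accumulate data_ore, then rebuild it over its sorted keys.
def dimA_one (small_ore : List (String × List (String × Int))) (smalls : List String) : List (String × Int) :=
  (fun data_ore =>
    (PySem.List.sorted data_ore.keys (fun k => k) false).map (fun k => (k, data_ore.getD k 0)))
  (smalls.foldl (dimA_step small_ore) PySem.Dict.empty)

def dim_to_ore_by_small (dim_small : List (String × List String)) (small_ore : List (String × List (String × Int))) : List (String × List (String × Int)) :=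
  (dim_small.foldl (fun data_fin p => data_fin.insert p.1 (dimA_one small_ore p.2)) (PySem.Dict.empty)).items

-- ===== PORT B =====
-- next(iter(small_ore[s].items())) (defaults only make it total; Pre_ excludes where Python raises)
def dimB_pair (small_ore : List (String × List (String × Int))) (s : String) : String × Int :=
  (PySem.Dict.getD (PySem.Dict.mk small_ore) s []).headD ("", 0)

-- B's grouping scan: the outer while-loop takes one run of consecutive equal-ore pairs per round
-- (the inner while = takeWhile/dropWhile of the run) and emits its summed weight.
def dimB_group : List (String × Int) → List (String × Int)
  | [] => []
  | (o, w) :: t =>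
    (o, w + ((t.takeWhile (fun q => q.1 == o)).map Prod.snd).sum)
      :: dimB_group (t.dropWhile (fun q => q.1 == o))
termination_by l => l.length
decreasing_by
  have := t.dropWhile_sublist (p := fun q => q.1 == o) |>.length_le
  simp only [List.length_cons]
  omega

-- B's body for one dimension: stable sort of the pairs by ore alone, then group-sum the runs.
def dimB_one (small_ore : List (String × List (String × Int))) (smalls : List String) : List (String × Int) :=
  dimB_group (PySem.List.sorted (smalls.map (dimB_pair small_ore)) (fun p => p.1) false)

def dim_to_ore_by_small_alt (dim_small : List (String × List String)) (small_ore : List (String × List (String × Int))) : List (String × List (String × Int)) :=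
  (PySem.Dict.ofList (dim_small.map (fun p => (p.1, dimB_one small_ore p.2)))).items

-- ===== PRECONDITION & SPEC =====
-- Pre_ excludes exactly the inputs on which A raises: a listed small that is missing from small_ore
-- (KeyError) or whose ore dict is empty (StopIteration).
def Pre_dim_to_ore_by_small (dim_small : List (String × List String)) (small_ore : List (String × List (String × Int))) : Prop :=
  ∀ p ∈ dim_small, ∀ s ∈ p.2,
    ((small_ore.find? (fun q => q.1 == s)).map (fun q => !q.2.isEmpty)).getD false = true
instance (dim_small : List (String × List String)) (small_ore : List (String × List (String × Int))) : Decidable (Pre_dim_to_ore_by_small dim_small small_ore) := by unfold Pre_dim_to_ore_by_small; infer_instance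

def pvWitness_dim_to_ore_by_small : (List (String × List String)) × (List (String × List (String × Int))) :=
  ([("overworld", ["copper", "tin"]), ("nether", ["tin"])], [("copper", [("iron", 3)]), ("tin", [("iron", 2), ("gold", 7)])])

def Spec_dim_to_ore_by_small (dim_small : List (String × List String)) (small_ore : List (String × List (String × Int))) (out : List (String × List (String × Int))) : Prop := out = dim_to_ore_by_small_alt dim_small small_ore
instance (dim_small : List (String × List String)) (small_ore : List (String × List (String × Int))) (out : List (String × List (String × Int))) : Decidable (Spec_dim_to_ore_by_small dim_small small_ore out) := by unfold Spec_dim_to_ore_by_small; infer_instance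

-- ===== CLAIM (what is proved, stated in full; the proofs are below) =====
def Claim_equal_dim_to_ore_by_small : Prop := ∀ (dim_small : List (String × List String)) (small_ore : List (String × List (String × Int))), Dom_dim_to_ore_by_small dim_small small_ore → Pre_dim_to_ore_by_small dim_small small_ore → Spec_dim_to_ore_by_small dim_small small_ore (dim_to_ore_by_small dim_small small_ore)

-- ===== LEMMAS AND PROOFS =====

-- A conditional insert-or-add at key k IS Dict.modify with default 0.
lemma insert_or_modify (d : PySem.Dict String Int) (k : String) (v : Int) :
    (if d.contains k then d.modify k 0 (fun x => x + v) else d.insert k v) = d.modify k 0 (fun x => x + v) := by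
  by_cases h : d.contains k = true
  · rw [if_pos h]
  · rw [if_neg h, PySem.Dict.modify,
      PySem.Dict.getD_of_not_contains d 0 (by simpa using h), zero_add]

-- A's accumulate step, rephrased through B's pair extraction.
lemma dimA_step_eq_modify (small_ore : List (String × List (String × Int))) (d : PySem.Dict String Int) (s : String) :
    dimA_step small_ore d s = d.modify (dimB_pair small_ore s).1 0 (fun v => v + (dimB_pair small_ore s).2) := by
  simp only [dimA_step, dimB_pair]
  exact insert_or_modify d _ _

-- getD after the whole modify-accumulation = initial value + sum of the matching weights.
lemma getD_modify_fold (ps : List (String × Int)) (d : PySem.Dict String Int) (k : String) :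
    (ps.foldl (fun d q => d.modify q.1 0 (fun v => v + q.2)) d).getD k 0
      = d.getD k 0 + ((ps.filter (fun q => q.1 == k)).map Prod.snd).sum := by
  induction ps generalizing d with
  | nil => simp
  | cons q t ih =>
    simp only [List.foldl_cons, ih, List.filter_cons]
    by_cases h : q.1 = k
    · simp [h]; ring
    · simp [PySem.Dict.getD_modify, h, Ne.symm h]

-- A's per-dimension body in canonical form: sorted distinct ores, each with its total weight.
lemma dimA_one_canon (small_ore : List (String × List (String × Int))) (smalls : List String) :
    dimA_one small_ore smalls
      = (PySem.List.sorted (PySem.Set.ofList ((smalls.map (dimB_pair small_ore)).map Prod.fst)) (fun k => k) false).map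
          (fun k => (k, (((smalls.map (dimB_pair small_ore)).filter (fun q => q.1 == k)).map Prod.snd).sum)) := by
  unfold dimA_one
  have hstep : smalls.foldl (dimA_step small_ore) PySem.Dict.empty
      = (smalls.map (dimB_pair small_ore)).foldl (fun d q => d.modify q.1 0 (fun v => v + q.2)) PySem.Dict.empty := by
    rw [List.foldl_map]
    congr 1
    funext d s
    exact dimA_step_eq_modify small_ore d s
  have hkeys : ((smalls.map (dimB_pair small_ore)).foldl (fun d q => d.modify q.1 0 (fun v => v + q.2)) PySem.Dict.empty).keys
      = PySem.Set.ofList ((smalls.map (dimB_pair small_ore)).map Prod.fst) := by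
    rw [PySem.Dict.keys_foldl_modify_key (smalls.map (dimB_pair small_ore)) Prod.fst 0
      (fun _ q => fun v => v + q.2) PySem.Dict.empty, PySem.Dict.keys_empty,
      PySem.Set.ofList_eq_foldl]
    rfl
  rw [hstep]
  beta_reduce
  rw [hkeys]
  refine List.map_congr_left (fun k _ => ?_)
  rw [getD_modify_fold, PySem.Dict.getD_empty, zero_add]

-- Set.ofList of a grouped list: a head key, its run, then keys not containing it again.
lemma ofList_cons_group (o : String) (L M : List String)
    (hL : ∀ a ∈ L, a = o) (hM : o ∉ M) :
    PySem.Set.ofList (o :: (L ++ M)) = o :: PySem.Set.ofList M := by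
  rw [PySem.Set.ofList_cons]
  congr 1
  induction L with
  | nil =>
    simp only [List.nil_append, PySem.Set.discard]
    exact List.filter_eq_self.mpr (fun a ha => by
      have hne : a ≠ o := fun hh => hM (hh ▸ (PySem.Set.mem_ofList M a).mp ha)
      simp [hne])
  | cons a L' ih =>
    have ha : a = o := hL a (List.mem_cons_self)
    subst ha
    rw [List.cons_append, PySem.Set.ofList_cons]
    simp only [PySem.Set.discard, List.filter_cons, beq_self_eq_true, Bool.not_true,
      List.filter_filter]
    have : ∀ y : String, (!y == a && !y == a) = (!y == a) := by
      intro y; cases (y == a) <;> simp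
    rw [List.filter_congr (fun y _ => this y)]
    exact ih (fun b hb => hL b (List.mem_cons_of_mem _ hb))

-- B's grouping scan of a key-sorted pair list = canonical map over its distinct keys.
lemma dimB_group_canon (ps : List (String × Int)) (h : ps.Pairwise (fun a b => a.1 ≤ b.1)) :
    dimB_group ps
      = (PySem.Set.ofList (ps.map Prod.fst)).map
          (fun k => (k, ((ps.filter (fun q => q.1 == k)).map Prod.snd).sum)) := by
  induction ps using dimB_group.induct with
  | case1 => simp [dimB_group]
  | case2 o w t ih =>
    have hsplit : t.takeWhile (fun q => q.1 == o) ++ t.dropWhile (fun q => q.1 == o) = t :=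
      t.takeWhile_append_dropWhile
    set run := t.takeWhile (fun q => q.1 == o) with hrun
    set rest := t.dropWhile (fun q => q.1 == o) with hrest
    have hho : ∀ q ∈ run, q.1 = o := by
      intro q hq
      have := List.mem_takeWhile_imp hq
      simpa using this
    have ht_pair : t.Pairwise (fun a b => a.1 ≤ b.1) := (List.pairwise_cons.mp h).2
    have hle : ∀ q ∈ t, o ≤ q.1 := fun q hq => (List.pairwise_cons.mp h).1 q hq
    have hrest_pair : rest.Pairwise (fun a b => a.1 ≤ b.1) :=
      ht_pair.sublist (t.dropWhile_sublist (p := fun q => q.1 == o))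
    have hrest_gt : ∀ q ∈ rest, o < q.1 := by
      intro q hq
      cases hr : rest with
      | nil => simp [hr] at hq
      | cons r rest' =>
        have hrhead : ¬ (r.1 == o) = true := by
          have := List.head_dropWhile_not (p := fun q => q.1 == o) (l := t) (by rw [← hrest, hr]; simp)
          simpa [← hrest, hr] using this
        have hr1 : o < r.1 := lt_of_le_of_ne
          (hle r ((t.dropWhile_sublist (p := fun q => q.1 == o)).subset
            (by rw [← hrest, hr]; exact List.mem_cons_self)))
          (fun hh => hrhead (by simp [← hh]))
        rw [hr] at hq
        rcases List.mem_cons.mp hq with rfl | hq'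
        · exact hr1
        · exact lt_of_lt_of_le hr1 ((List.pairwise_cons.mp (hr ▸ hrest_pair)).1 q hq')
    have hM : o ∉ rest.map Prod.fst := by
      intro hmem
      rcases List.mem_map.mp hmem with ⟨q, hq, hq1⟩
      exact absurd hq1 (ne_of_gt (hrest_gt q hq))
    have hkeys : PySem.Set.ofList (((o, w) :: t).map Prod.fst)
        = o :: PySem.Set.ofList (rest.map Prod.fst) := by
      have : ((o, w) :: t).map Prod.fst = o :: (run.map Prod.fst ++ rest.map Prod.fst) := by
        simp [← List.map_append, hsplit]
      rw [this]
      exact ofList_cons_group o _ _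
        (fun a ha => by rcases List.mem_map.mp ha with ⟨q, hq, rfl⟩; exact hho q hq) hM
    rw [dimB_group, hkeys, List.map_cons]
    congr 1
    · -- head: the run sums to the filter over the whole list at key o
      have hfilter : ((o, w) :: t).filter (fun q => q.1 == o) = (o, w) :: run := by
        have h1 : run.filter (fun q => q.1 == o) = run :=
          List.filter_eq_self.mpr (fun q hq => by simp [hho q hq])
        have h2 : rest.filter (fun q => q.1 == o) = [] :=
          List.filter_eq_nil_iff.mpr (fun q hq => by simp [ne_of_gt (hrest_gt q hq)])
        rw [← hsplit]
        simp [List.filter_append, h1, h2]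
      rw [hfilter, ← hrun]
      simp
    · -- tail: recurse on rest; keys of rest never match inside run or at o
      rw [ih hrest_pair]
      refine List.map_congr_left (fun k hk => ?_)
      have hk_mem : k ∈ rest.map Prod.fst := (PySem.Set.mem_ofList _ k).mp hk
      have hko : o < k := by
        rcases List.mem_map.mp hk_mem with ⟨q, hq, rfl⟩; exact hrest_gt q hq
      have hfilter : ((o, w) :: t).filter (fun q => q.1 == k) = rest.filter (fun q => q.1 == k) := by
        rw [← hsplit]
        have h1 : run.filter (fun q => q.1 == k) = [] :=
          List.filter_eq_nil_iff.mpr (fun q hq => by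
            simp only [hho q hq, beq_iff_eq]; exact ne_of_lt hko)
        simp only [List.filter_cons, List.filter_append, h1, beq_iff_eq, List.nil_append]
        rw [if_neg (ne_of_lt hko)]
      rw [hfilter]

-- The stably key-sorted pair list has ≤-ordered keys.
lemma sorted_keys_pairwise (ps : List (String × Int)) :
    (PySem.List.sorted ps (fun p => p.1) false).Pairwise (fun a b => a.1 ≤ b.1) :=
  PySem.List.sorted_pairwise ps (fun p => p.1)

-- set(xs) (first occurrences in order) is a sublist of xs.
lemma ofList_sublist {α : Type} [BEq α] [LawfulBEq α] (xs : List α) : (PySem.Set.ofList xs).Sublist xs := by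
  induction xs with
  | nil => exact List.Sublist.refl _
  | cons x t ih =>
    rw [PySem.Set.ofList_cons x t]
    simp only [PySem.Set.discard]
    exact (List.Sublist.trans List.filter_sublist ih).cons₂ x

-- The distinct keys of the sorted pairs ARE sorted(set(keys of the unsorted pairs)).
lemma key_set_eq (ps : List (String × Int)) :
    PySem.List.sorted (PySem.Set.ofList (ps.map Prod.fst)) (fun k => k) false
      = PySem.Set.ofList ((PySem.List.sorted ps (fun p => p.1) false).map Prod.fst) := by
  apply PySem.List.sorted_eq_of_perm_of_pairwise_lt
  · rw [List.perm_ext_iff_of_nodup (PySem.Set.nodup_ofList _) (PySem.Set.nodup_ofList _)]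
    intro a
    rw [PySem.Set.mem_ofList, PySem.Set.mem_ofList]
    exact List.Perm.mem_iff (((PySem.List.sorted_perm ps (fun p => p.1) false).map Prod.fst))
  · have hle : (PySem.Set.ofList ((PySem.List.sorted ps (fun p => p.1) false).map Prod.fst)).Pairwise (· ≤ ·) :=
      (PySem.List.sorted_map_key_pairwise ps (fun p => p.1)).sublist (ofList_sublist _)
    have hne : (PySem.Set.ofList ((PySem.List.sorted ps (fun p => p.1) false).map Prod.fst)).Pairwise (· ≠ ·) :=
      PySem.Set.nodup_ofList _
    exact (hle.and hne).imp (fun h => lt_of_le_of_ne h.1 h.2)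

-- The per-key weight sums agree between the sorted and unsorted pair lists.
lemma key_sum_eq (ps : List (String × Int)) (k : String) :
    (((PySem.List.sorted ps (fun p => p.1) false).filter (fun q => q.1 == k)).map Prod.snd).sum
      = ((ps.filter (fun q => q.1 == k)).map Prod.snd).sum :=
  (((PySem.List.sorted_perm ps (fun p => p.1) false).filter _).map Prod.snd).sum_eq

-- The two per-dimension bodies agree.
lemma dim_one_eq (small_ore : List (String × List (String × Int))) (smalls : List String) :
    dimA_one small_ore smalls = dimB_one small_ore smalls := by
  rw [dimA_one_canon, dimB_one, dimB_group_canon _ (sorted_keys_pairwise _), ← key_set_eq]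
  exact List.map_congr_left (fun k _ => by rw [key_sum_eq])

-- ===== VERDICT (by name: the statement is the Claim_ definition above) =====
theorem dim_to_ore_by_small_spec : Claim_equal_dim_to_ore_by_small := by
  intro dim_small small_ore _ _
  unfold Spec_dim_to_ore_by_small dim_to_ore_by_small dim_to_ore_by_small_alt
  have h : PySem.Dict.ofList (dim_small.map (fun p => (p.1, dimB_one small_ore p.2)))
      = (dim_small.map (fun p => (p.1, dimB_one small_ore p.2))).foldl
          (fun d q => d.insert q.1 q.2) PySem.Dict.empty := rfl
  rw [h, List.foldl_map]
  simp only [dim_one_eq]
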